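-- pv_equiv track=rewrite | github.com/BRG-research/compas_singular | src/compas_singular/utilities/lists.py | sublist_from_to_items_in_closed_list
-- ===== SOURCE A (Python) =====
-- def list_split(thelist, indices):
--     """Split list at given indices.
--     Closed lists have the same first and last elements.
--     If the list is closed, splitting wraps around if the first or last index is not in the indices to split.
--
--
--     Parameters
--     ----------
--     thelist : list
--             A list.
--     indices : list
--             A list of indices to split.
--
--     Returns
--     -------
--     split_lists : list
--             Nest lists from splitting the list at the given indices.
--
--     """
--
--     n = len(thelist)
--
--     if thelist[0] == thelist[-1]:
--         closed = True
--         if n - 1 in indices: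
--             indices.remove(n - 1)
--             if 0 not in indices:
--                 indices.append(0)
--     else:
--         closed = False
--
--     indices = list(sorted(set(indices)))
--
--     split_lists = []
--     current_list = []
--     for index, item in enumerate(thelist):
--         current_list.append(item)
--         if (index in indices and index != 0) or index == n - 1:
--             split_lists.append(current_list)
--             current_list = [item]
--
--     if closed:
--         if 0 not in indices:
--             start = split_lists.pop(0)[1:]
--             split_lists[-1] += start
--
--     return split_lists
--
-- def sublist_from_to_items_in_closed_list(thelist, from_item, to_item):
--     """Return sublist between oe item to another.
--
--     Parameters
--     ----------
--     thelist : list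
--             A list.
--     from_item
--             An item to be found in the list. The beginning of the sublist.
--     to_item
--             An item to be found in the list. The end of the sublist.
--
--     Returns
--     -------
--     sublist : list
--             A sublist from the input list, between from_item and to_item.
--     """
--
--     if from_item == to_item:
--         return [from_item]
--     if thelist[0] != thelist[-1]:
--         thelist.append(thelist[0])
--     from_idx = thelist.index(from_item)
--     to_idx = thelist.index(to_item)
--     sublists = list_split(thelist, [from_idx, to_idx])
--
--     for sublist in sublists:
--         if sublist[0] == from_item:
--             return sublist
-- ===== SOURCE B (Python) =====
-- def sublist_from_to_items_in_closed_list(thelist, from_item, to_item):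
--     if from_item == to_item:
--         return [from_item]
--     if thelist[0] != thelist[-1]:
--         thelist.append(thelist[0])
--     from_idx = thelist.index(from_item)
--     to_idx = thelist.index(to_item)
--     n = len(thelist)
--     if from_idx <= to_idx:
--         return thelist[from_idx:to_idx + 1]
--     return thelist[from_idx:n - 1] + thelist[0:to_idx + 1]
-- ===== Notes on version B (the rewrite author's own statement) =====
-- stated objective: simpler
-- what changed: Replaces the split-at-indices helper (sort/dedup indices, enumerate-and-split into pieces, pop-and-merge for the wrap, then scan pieces for the one starting at from_item) with direct extraction of the cyclic segment by two slices chosen by comparing the two first-occurrence indices.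
import Mathlib
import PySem

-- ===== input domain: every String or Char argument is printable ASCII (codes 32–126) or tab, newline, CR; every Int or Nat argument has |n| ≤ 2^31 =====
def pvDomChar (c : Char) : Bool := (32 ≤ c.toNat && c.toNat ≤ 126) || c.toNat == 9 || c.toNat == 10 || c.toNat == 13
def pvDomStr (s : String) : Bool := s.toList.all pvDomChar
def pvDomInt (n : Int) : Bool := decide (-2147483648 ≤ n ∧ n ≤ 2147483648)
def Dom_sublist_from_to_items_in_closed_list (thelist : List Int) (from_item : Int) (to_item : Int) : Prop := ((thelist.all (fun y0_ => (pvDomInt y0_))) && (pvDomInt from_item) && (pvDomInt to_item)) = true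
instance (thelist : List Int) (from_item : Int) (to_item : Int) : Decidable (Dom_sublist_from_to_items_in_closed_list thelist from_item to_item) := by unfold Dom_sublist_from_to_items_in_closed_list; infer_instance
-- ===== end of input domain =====

-- B replaces A's split-table-then-scan strategy (list_split at the two indices, then scan the
-- pieces for the one starting at from_item) by direct slicing of the cyclic segment (simpler).
-- A mutates its argument in place (appends thelist[0] when the list is open); B performs the same
-- mutation in Python; the equivalence proved here is about the RETURN value only.

-- ===== PORT A =====
def pvSplitStep (indices : List Int) (n : Int) (st : List (List Int) × List Int) (p : Int × Int) : List (List Int) × List Int :=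
  let current := st.2 ++ [p.2]
  if (p.1 ∈ indices ∧ p.1 ≠ 0) ∨ p.1 = n - 1 then (st.1 ++ [current], [p.2]) else (st.1, current)

def pvListSplit (thelist : List Int) (indices0 : List Int) : List (List Int) :=
  let n : Int := thelist.length
  let closed : Bool := PySem.List.pyGetD thelist 0 0 == PySem.List.pyGetD thelist (-1) 0
  let indices :=
    if closed then
      if (n - 1) ∈ indices0 then
        let indices1 := (PySem.List.remove? indices0 (n - 1)).getD indices0
        if (0 : Int) ∉ indices1 then indices1 ++ [0] else indices1
      else indices0
    else indices0
  let indices := PySem.List.sorted (PySem.Set.ofList indices) id false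
  let st := (PySem.List.enumerate thelist 0).foldl (pvSplitStep indices n) ([], [])
  let split_lists := st.1
  if closed then
    if (0 : Int) ∉ indices then
      match split_lists with
      | [] => []
      | first :: rest =>
        let start := first.drop 1
        match rest with
        | [] => []
        | r :: rs => (r :: rs).dropLast ++ [((r :: rs).getLast (by simp)) ++ start]
    else split_lists
  else split_lists

def sublist_from_to_items_in_closed_list (thelist : List Int) (from_item : Int) (to_item : Int) : List Int :=
  if from_item = to_item then [from_item]
  else
    let thelist :=
      if PySem.List.pyGetD thelist 0 0 ≠ PySem.List.pyGetD thelist (-1) 0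
      then thelist ++ [PySem.List.pyGetD thelist 0 0] else thelist
    let from_idx : Int := ((PySem.List.index? thelist from_item).getD 0 : Nat)
    let to_idx : Int := ((PySem.List.index? thelist to_item).getD 0 : Nat)
    let sublists := pvListSplit thelist [from_idx, to_idx]
    ((sublists.find? (fun s => PySem.List.pyGetD s 0 0 == from_item)).getD [])

-- ===== PORT B =====
def sublist_from_to_items_in_closed_list_alt (thelist : List Int) (from_item : Int) (to_item : Int) : List Int :=
  if from_item = to_item then [from_item]
  else
    let thelist :=
      if PySem.List.pyGetD thelist 0 0 ≠ PySem.List.pyGetD thelist (-1) 0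
      then thelist ++ [PySem.List.pyGetD thelist 0 0] else thelist
    let from_idx : Int := ((PySem.List.index? thelist from_item).getD 0 : Nat)
    let to_idx : Int := ((PySem.List.index? thelist to_item).getD 0 : Nat)
    let n : Int := thelist.length
    if from_idx ≤ to_idx then PySem.List.slice thelist (some from_idx) (some (to_idx + 1))
    else PySem.List.slice thelist (some from_idx) (some (n - 1)) ++ PySem.List.slice thelist (some 0) (some (to_idx + 1))

-- ===== PRECONDITION & SPEC =====
-- Pre_ excludes exactly the inputs where Python A raises: with from_item ≠ to_item, the empty
-- list (IndexError on thelist[0]) and items absent from the list (ValueError from .index).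
def Pre_sublist_from_to_items_in_closed_list (thelist : List Int) (from_item : Int) (to_item : Int) : Prop :=
  from_item = to_item ∨ (thelist ≠ [] ∧ from_item ∈ thelist ∧ to_item ∈ thelist)
instance (thelist : List Int) (from_item : Int) (to_item : Int) : Decidable (Pre_sublist_from_to_items_in_closed_list thelist from_item to_item) := by unfold Pre_sublist_from_to_items_in_closed_list; infer_instance
def pvWitness_sublist_from_to_items_in_closed_list : List Int × Int × Int := ([1, 2, 3, 4, 1], 3, 2)

def Spec_sublist_from_to_items_in_closed_list (thelist : List Int) (from_item : Int) (to_item : Int) (out : List Int) : Prop := out = sublist_from_to_items_in_closed_list_alt thelist from_item to_item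
instance (thelist : List Int) (from_item : Int) (to_item : Int) (out : List Int) : Decidable (Spec_sublist_from_to_items_in_closed_list thelist from_item to_item out) := by unfold Spec_sublist_from_to_items_in_closed_list; infer_instance

-- ===== CLAIM (what is proved, stated in full; the proofs are below) =====
def Claim_equal_sublist_from_to_items_in_closed_list : Prop := ∀ (thelist : List Int) (from_item : Int) (to_item : Int), Dom_sublist_from_to_items_in_closed_list thelist from_item to_item → Pre_sublist_from_to_items_in_closed_list thelist from_item to_item → Spec_sublist_from_to_items_in_closed_list thelist from_item to_item (sublist_from_to_items_in_closed_list thelist from_item to_item)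

-- ===== LEMMAS AND PROOFS =====
theorem fold_noSplit (S : List Int) (n : Int) (M : List Int) (k : Int) (acc : List (List Int)) (cur : List Int)
    (h : ∀ m : Nat, m < M.length → ¬(((k + m) ∈ S ∧ (k + (m:Int)) ≠ 0) ∨ (k + (m:Int)) = n - 1)) :
    (PySem.List.enumerate M k).foldl (pvSplitStep S n) (acc, cur) = (acc, cur ++ M) := by
  induction M generalizing k cur with
  | nil => simp [PySem.List.enumerate_nil]
  | cons x xs ih =>
    rw [PySem.List.enumerate_cons, List.foldl_cons]
    have h0 := h 0 (by simp)
    push_cast at h0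
    rw [pvSplitStep]
    simp only [add_zero] at h0
    rw [if_neg h0]
    rw [ih (k+1) (cur ++ [x]) (fun m hm => by
      have := h (m+1) (by simpa using Nat.succ_lt_succ hm)
      push_cast at this ⊢
      convert this using 3 <;> ring_nf
      )]
    simp

theorem fold_seg (S : List Int) (n : Int) (M : List Int) (x : Int) (k : Int) (acc : List (List Int)) (cur : List Int)
    (h : ∀ m : Nat, m < M.length → ¬(((k + m) ∈ S ∧ (k + (m:Int)) ≠ 0) ∨ (k + (m:Int)) = n - 1))
    (hx : ((k + M.length) ∈ S ∧ (k + (M.length:Int)) ≠ 0) ∨ (k + (M.length:Int)) = n - 1) :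
    (PySem.List.enumerate (M ++ [x]) k).foldl (pvSplitStep S n) (acc, cur) = (acc ++ [cur ++ M ++ [x]], [x]) := by
  rw [PySem.List.enumerate_append, List.foldl_append, fold_noSplit S n M k acc cur h]
  rw [PySem.List.enumerate_cons, PySem.List.enumerate_nil, List.foldl_cons, List.foldl_nil, pvSplitStep]
  simp only []
  rw [if_pos hx]

theorem fold_two_seg (S : List Int) (n : Int) (M1 M2 : List Int) (x y : Int)
    (h1 : ∀ m : Nat, m < M1.length → ¬(((m:Int) ∈ S ∧ (m:Int) ≠ 0) ∨ (m:Int) = n - 1))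
    (hx : ((M1.length:Int) ∈ S ∧ (M1.length:Int) ≠ 0) ∨ (M1.length:Int) = n - 1)
    (h2 : ∀ m : Nat, m < M2.length → ¬(((M1.length + 1 + m :Int) ∈ S ∧ (M1.length + 1 + m :Int) ≠ 0) ∨ (M1.length + 1 + m :Int) = n - 1))
    (hy : ((M1.length + 1 + M2.length :Int) ∈ S ∧ (M1.length + 1 + M2.length :Int) ≠ 0) ∨ (M1.length + 1 + M2.length :Int) = n - 1) :
    ((PySem.List.enumerate (M1 ++ [x] ++ (M2 ++ [y])) 0).foldl (pvSplitStep S n) ([], [])).1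
      = [M1 ++ [x], x :: (M2 ++ [y])] := by
  rw [PySem.List.enumerate_append, List.foldl_append]
  rw [fold_seg S n M1 x 0 [] [] (fun m hm => by simpa using h1 m hm) (by simpa using hx)]
  have hlen : (0 : Int) + (M1 ++ [x]).length = ((M1.length : Int) + 1) := by simp
  rw [hlen]
  rw [fold_seg S n M2 y ((M1.length:Int)+1) ([] ++ [[] ++ M1 ++ [x]]) [x]
      (fun m hm => by have := h2 m hm; push_cast at this ⊢; convert this using 3 <;> ring_nf)
      (by push_cast at hy ⊢; convert hy using 3 <;> ring_nf)]
  simp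

theorem fold_three_seg (S : List Int) (n : Int) (M1 M2 M3 : List Int) (x y z : Int)
    (h1 : ∀ m : Nat, m < M1.length → ¬(((m:Int) ∈ S ∧ (m:Int) ≠ 0) ∨ (m:Int) = n - 1))
    (hx : ((M1.length:Int) ∈ S ∧ (M1.length:Int) ≠ 0) ∨ (M1.length:Int) = n - 1)
    (h2 : ∀ m : Nat, m < M2.length → ¬(((M1.length + 1 + m :Int) ∈ S ∧ (M1.length + 1 + m :Int) ≠ 0) ∨ (M1.length + 1 + m :Int) = n - 1))
    (hy : ((M1.length + 1 + M2.length :Int) ∈ S ∧ (M1.length + 1 + M2.length :Int) ≠ 0) ∨ (M1.length + 1 + M2.length :Int) = n - 1)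
    (h3 : ∀ m : Nat, m < M3.length → ¬(((M1.length + 1 + M2.length + 1 + m :Int) ∈ S ∧ (M1.length + 1 + M2.length + 1 + m :Int) ≠ 0) ∨ (M1.length + 1 + M2.length + 1 + m :Int) = n - 1))
    (hz : ((M1.length + 1 + M2.length + 1 + M3.length :Int) ∈ S ∧ (M1.length + 1 + M2.length + 1 + M3.length :Int) ≠ 0) ∨ (M1.length + 1 + M2.length + 1 + M3.length :Int) = n - 1) :
    ((PySem.List.enumerate (M1 ++ [x] ++ (M2 ++ [y]) ++ (M3 ++ [z])) 0).foldl (pvSplitStep S n) ([], [])).1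
      = [M1 ++ [x], x :: (M2 ++ [y]), y :: (M3 ++ [z])] := by
  rw [PySem.List.enumerate_append, List.foldl_append]
  rw [PySem.List.enumerate_append, List.foldl_append]
  rw [fold_seg S n M1 x 0 [] [] (fun m hm => by simpa using h1 m hm) (by simpa using hx)]
  have hlen : (0 : Int) + (M1 ++ [x]).length = ((M1.length : Int) + 1) := by simp
  rw [hlen]
  rw [fold_seg S n M2 y ((M1.length:Int)+1) ([] ++ [[] ++ M1 ++ [x]]) [x]
      (fun m hm => by have := h2 m hm; push_cast at this ⊢; convert this using 3 <;> ring_nf)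
      (by push_cast at hy ⊢; convert hy using 3 <;> ring_nf)]
  have hlen2 : (0:Int) + ((M1 ++ [x] ++ (M2 ++ [y])).length : Int) = ((M1.length : Int) + 1 + M2.length + 1) := by push_cast; simp; ring
  rw [hlen2]
  rw [fold_seg S n M3 z ((M1.length:Int)+1+M2.length+1) (([] ++ [[] ++ M1 ++ [x]]) ++ [[x] ++ M2 ++ [y]]) [y]
      (fun m hm => by have := h3 m hm; push_cast at this ⊢; convert this using 3 <;> ring_nf)
      (by push_cast at hz ⊢; convert hz using 3 <;> ring_nf)]
  simp

theorem sorted_pair (a b : Int) (h : a ≠ b) : PySem.List.sorted (PySem.Set.ofList [a,b]) id false = if a ≤ b then [a,b] else [b,a] := by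
  simp [PySem.Set.ofList, PySem.List.sorted, PySem.Set.add]
  split_ifs with h1 h2 <;> simp_all [PySem.List.insertBy]

theorem main_core (L : List Int) (from_item to_item : Int) (hne : from_item ≠ to_item)
    (hL : L ≠ []) (hcl : L.head? = L.getLast?) (f t : Nat)
    (hf : PySem.List.index? L from_item = some f) (ht : PySem.List.index? L to_item = some t) :
    ((pvListSplit L [(f : Int), (t : Int)]).find? (fun s => PySem.List.pyGetD s 0 0 == from_item)).getD []
      = if (f : Int) ≤ (t : Int) then PySem.List.slice L (some (f:Int)) (some ((t:Int)+1))
        else PySem.List.slice L (some (f:Int)) (some ((L.length:Int) - 1)) ++ PySem.List.slice L (some 0) (some ((t:Int)+1)) := by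
  obtain ⟨hflt, hfval, hfmin⟩ := PySem.List.getElem_of_index?_eq_some hf
  obtain ⟨htlt, htval, htmin⟩ := PySem.List.getElem_of_index?_eq_some ht
  have h00 : L.getLast hL = L[0]'(List.length_pos_of_ne_nil hL) := by
    have h1 := List.head?_eq_some_head hL
    have h2 := List.getLast?_eq_some_getLast hL
    rw [h1, h2] at hcl
    have h3 : L.head hL = L.getLast hL := (Option.some.injEq _ _).mp hcl
    rw [← h3, List.head_eq_getElem]
  have hlastval : L[L.length - 1]'(by omega) = L[0]'(by omega) := by
    rw [← List.getLast_eq_getElem hL]; exact h00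
  have hft : f ≠ t := by
    intro h; subst h; exact hne (hfval ▸ htval ▸ rfl)
  have hfn1 : f < L.length - 1 := by
    rcases Nat.lt_or_ge f (L.length - 1) with h | h
    · exact h
    · exfalso
      have hfeq : f = L.length - 1 := by omega
      subst hfeq
      rcases Nat.eq_zero_or_pos (L.length - 1) with h0 | h0
      · exact hft (by omega)
      · exact hfmin 0 h0 (by rw [← hlastval]; exact hfval)
  have htn1 : t < L.length - 1 := by
    rcases Nat.lt_or_ge t (L.length - 1) with h | h
    · exact h
    · exfalso
      have hteq : t = L.length - 1 := by omega
      subst hteq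
      rcases Nat.eq_zero_or_pos (L.length - 1) with h0 | h0
      · exact hft (by omega)
      · exact htmin 0 h0 (by rw [← hlastval]; exact htval)
  have hn2 : 2 ≤ L.length := by omega
  have hLpos : 0 < L.length := List.length_pos_of_ne_nil hL
  have hclosed : (PySem.List.pyGetD L 0 0 == PySem.List.pyGetD L (-1) 0) = true := by
    rw [PySem.List.pyGetD_neg_one (h := hL) (d := (0:Int)), h00, PySem.List.pyGetD_zero]
    simp [List.getD, List.getElem?_eq_getElem hLpos]
  have hnotmem : ¬ ((L.length:Int) - 1 ∈ ([(f:Int),(t:Int)] : List Int)) := by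
    simp only [List.mem_cons, List.not_mem_nil, or_false]
    push_cast; omega
  have hfnet : (f:Int) ≠ (t:Int) := by exact_mod_cast hft
  unfold pvListSplit
  simp only [hclosed, if_true, if_neg hnotmem]
  rw [sorted_pair _ _ hfnet]
  rcases Nat.lt_or_ge f t with hlt | hge
  · -- f < t
    rw [if_pos (show ((f:Int) ≤ (t:Int)) from by exact_mod_cast hlt.le),
        if_pos (show ((f:Int) ≤ (t:Int)) from by exact_mod_cast hlt.le)]
    -- decomposition helpers
    have ht0 : 0 < t := by omega
    have hdne : L.drop (t+1) ≠ [] := by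
      apply List.ne_nil_of_length_pos; rw [List.length_drop]; omega
    have hgl : (L.drop (t+1)).getLast hdne = L.getLast hL := List.getLast_drop _
    have e1 : L.take t ++ [L[t]] = L.take (t+1) := by
      rw [List.take_succ, List.getElem?_eq_getElem htlt]; rfl
    have e2 : (L.drop (t+1)).dropLast ++ [L.getLast hL] = L.drop (t+1) := by
      rw [← hgl]; exact List.dropLast_append_getLast hdne
    by_cases hf0 : f = 0
    · subst hf0
      rw [if_neg (by simp)]
      have hdec : L = (L.take t ++ [L[t]]) ++ ((L.drop (t+1)).dropLast ++ [L.getLast hL]) := by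
        rw [e1, e2, List.take_append_drop]
      have hfold : (List.foldl (pvSplitStep [((0:Nat):Int), (t:Int)] (L.length:Int)) ([], []) (PySem.List.enumerate L 0)).1
          = [L.take t ++ [L[t]], L[t] :: ((L.drop (t+1)).dropLast ++ [L.getLast hL])] := by
        conv_lhs => rw [hdec]
        rw [show ((List.take t L ++ [L[t]] ++ ((List.drop (t + 1) L).dropLast ++ [L.getLast hL])).length : Int) = (L.length : Int) from by rw [← hdec]]
        rw [← fold_two_seg [((0:Nat):Int), (t:Int)] (L.length:Int) (L.take t) ((L.drop (t+1)).dropLast) L[t] (L.getLast hL)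
            (by intro m hm; simp only [List.length_take, List.mem_cons, List.not_mem_nil, or_false] at hm ⊢; push_cast; omega)
            (by simp only [List.length_take, List.mem_cons, List.not_mem_nil, or_false]; push_cast; omega)
            (by intro m hm; simp only [List.length_take, List.length_dropLast, List.length_drop, List.mem_cons, List.not_mem_nil, or_false] at hm ⊢; push_cast; omega)
            (by simp only [List.length_take, List.length_dropLast, List.length_drop, List.mem_cons, List.not_mem_nil, or_false]; push_cast; omega)]
      rw [hfold]
      rw [e1, e2]
      -- find? on [take (t+1), L[t] :: drop (t+1)]
      have hhead : PySem.List.pyGetD (L.take (t+1)) 0 0 = from_item := by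
        rw [PySem.List.pyGetD_zero]
        simp [List.getD, List.getElem?_take, List.getElem?_eq_getElem hLpos]
        exact hfval
      rw [List.find?]
      simp only [hhead, beq_self_eq_true]
      simp only [Option.getD_some]
      -- RHS: slice L 0 (t+1) = take (t+1)
      have : ((t:Int) + 1) = ((t+1 : Nat) : Int) := by push_cast; ring
      rw [this]
      rw [show ((0:Nat):Int) = ((0:Nat):Int) from rfl]
      rw [PySem.List.slice_natCast]
      simp
    · -- 0 < f < t
      have hf0' : 0 < f := Nat.pos_of_ne_zero hf0
      rw [if_pos (show (0:Int) ∉ ([(f:Int),(t:Int)] : List Int) from by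
        simp only [List.mem_cons, List.not_mem_nil, or_false]; push_cast; omega)]
      have e1' : L.take f ++ [L[f]] = L.take (f+1) := by
        rw [List.take_succ, List.getElem?_eq_getElem hflt]; rfl
      have e2' : (L.drop (f+1)).take (t-f-1) ++ [L[t]] = (L.drop (f+1)).take (t-f) := by
        rw [show t-f = (t-f-1)+1 from by omega, List.take_succ, List.getElem?_drop,
            show f+1+(t-f-1) = t from by omega, List.getElem?_eq_getElem htlt]
        rfl
      have hdec : L = L.take f ++ [L[f]] ++ ((L.drop (f+1)).take (t-f-1) ++ [L[t]]) ++ ((L.drop (t+1)).dropLast ++ [L.getLast hL]) := by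
        rw [e1', e2', e2]
        conv_lhs => rw [← List.take_append_drop (f+1) L]
        conv_lhs => rw [← List.take_append_drop (t-f) (L.drop (f+1))]
        rw [List.drop_drop, show f+1+(t-f) = t+1 from by omega]
        rw [List.append_assoc]
      have hfold : (List.foldl (pvSplitStep [(f:Int), (t:Int)] (L.length:Int)) ([], []) (PySem.List.enumerate L 0)).1
          = [L.take f ++ [L[f]], L[f] :: ((L.drop (f+1)).take (t-f-1) ++ [L[t]]), L[t] :: ((L.drop (t+1)).dropLast ++ [L.getLast hL])] := by
        conv_lhs => rw [hdec]
        rw [show ((L.take f ++ [L[f]] ++ ((L.drop (f+1)).take (t-f-1) ++ [L[t]]) ++ ((L.drop (t+1)).dropLast ++ [L.getLast hL])).length : Int) = (L.length : Int) from by rw [← hdec]]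
        rw [← fold_three_seg [(f:Int), (t:Int)] (L.length:Int) (L.take f) ((L.drop (f+1)).take (t-f-1)) ((L.drop (t+1)).dropLast) L[f] L[t] (L.getLast hL)
            (by intro m hm; simp only [List.length_take, List.mem_cons, List.not_mem_nil, or_false] at hm ⊢; push_cast; omega)
            (by simp only [List.length_take, List.mem_cons, List.not_mem_nil, or_false]; push_cast; omega)
            (by intro m hm; simp only [List.length_take, List.length_drop, List.mem_cons, List.not_mem_nil, or_false] at hm ⊢; push_cast; omega)
            (by simp only [List.length_take, List.length_drop, List.mem_cons, List.not_mem_nil, or_false]; push_cast; omega)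
            (by intro m hm; simp only [List.length_take, List.length_dropLast, List.length_drop, List.mem_cons, List.not_mem_nil, or_false] at hm ⊢; push_cast; omega)
            (by simp only [List.length_take, List.length_dropLast, List.length_drop, List.mem_cons, List.not_mem_nil, or_false]; push_cast; omega)]
      rw [hfold, e2', e2]
      have hh2 : PySem.List.pyGetD (L[f] :: (L.drop (f+1)).take (t-f)) 0 0 = from_item := by
        rw [PySem.List.pyGetD_zero_cons]; exact hfval
      change ((List.find? (fun s => PySem.List.pyGetD s 0 0 == from_item)
        [L[f] :: (L.drop (f+1)).take (t-f),
         (L[t] :: L.drop (t+1)) ++ (L.take f ++ [L[f]]).drop 1]).getD []) = _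
      rw [List.find?_cons_of_pos (by rw [hh2]; exact beq_self_eq_true _)]
      simp only [Option.getD_some]
      rw [show ((t:Int) + 1) = ((t+1 : Nat) : Int) from by push_cast; ring, PySem.List.slice_natCast]
      rw [show t+1-f = (t-f)+1 from by omega, List.drop_eq_getElem_cons hflt, List.take_succ_cons]
  · -- t < f
    have hgt : t < f := by omega
    rw [if_neg (show ¬ ((f:Int) ≤ (t:Int)) from by push_cast; omega),
        if_neg (show ¬ ((f:Int) ≤ (t:Int)) from by push_cast; omega)]
    have hdne : L.drop (f+1) ≠ [] := by
      apply List.ne_nil_of_length_pos; rw [List.length_drop]; omega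
    have hgl : (L.drop (f+1)).getLast hdne = L.getLast hL := List.getLast_drop _
    have e1 : L.take f ++ [L[f]] = L.take (f+1) := by
      rw [List.take_succ, List.getElem?_eq_getElem hflt]; rfl
    have e2 : (L.drop (f+1)).dropLast ++ [L.getLast hL] = L.drop (f+1) := by
      rw [← hgl]; exact List.dropLast_append_getLast hdne
    have hdfne : L.drop f ≠ [] := by
      apply List.ne_nil_of_length_pos; rw [List.length_drop]; omega
    have hdfull : (L.drop f).dropLast ++ [L[0]] = L.drop f := by
      rw [← h00, ← List.getLast_drop hdfne]
      exact List.dropLast_append_getLast hdfne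
    have htake1 : L.take 1 = [L[0]] := by
      rw [List.take_succ, List.getElem?_eq_getElem hLpos]; rfl
    have hdropLastf : (L.drop f).take (L.length - 1 - f) = (L.drop f).dropLast := by
      rw [List.dropLast_eq_take, List.length_drop]
      congr 1; omega
    have hsl1 : PySem.List.slice L (some (f:Int)) (some ((L.length:Int) - 1)) = (L.drop f).take (L.length - 1 - f) := by
      rw [show ((L.length:Int) - 1) = ((L.length - 1 : Nat) : Int) from by push_cast [Nat.cast_sub (by omega : 1 ≤ L.length)]; ring,
          PySem.List.slice_natCast]
    by_cases ht0 : t = 0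
    · subst ht0
      rw [if_neg (by simp)]
      have hdec : L = (L.take f ++ [L[f]]) ++ ((L.drop (f+1)).dropLast ++ [L.getLast hL]) := by
        rw [e1, e2, List.take_append_drop]
      have hfold : (List.foldl (pvSplitStep [((0:Nat):Int), (f:Int)] (L.length:Int)) ([], []) (PySem.List.enumerate L 0)).1
          = [L.take f ++ [L[f]], L[f] :: ((L.drop (f+1)).dropLast ++ [L.getLast hL])] := by
        conv_lhs => rw [hdec]
        rw [show ((L.take f ++ [L[f]] ++ ((L.drop (f+1)).dropLast ++ [L.getLast hL])).length : Int) = (L.length : Int) from by rw [← hdec]]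
        rw [← fold_two_seg [((0:Nat):Int), (f:Int)] (L.length:Int) (L.take f) ((L.drop (f+1)).dropLast) L[f] (L.getLast hL)
            (by intro m hm; simp only [List.length_take, List.mem_cons, List.not_mem_nil, or_false] at hm ⊢; push_cast; omega)
            (by simp only [List.length_take, List.mem_cons, List.not_mem_nil, or_false]; push_cast; omega)
            (by intro m hm; simp only [List.length_take, List.length_dropLast, List.length_drop, List.mem_cons, List.not_mem_nil, or_false] at hm ⊢; push_cast; omega)
            (by simp only [List.length_take, List.length_dropLast, List.length_drop, List.mem_cons, List.not_mem_nil, or_false]; push_cast; omega)]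
      rw [hfold, e1, e2]
      have hh0 : PySem.List.pyGetD (L.take (f+1)) 0 0 = to_item := by
        rw [PySem.List.pyGetD_zero]
        simp [List.getD, List.getElem?_eq_getElem hLpos]
        exact htval
      have hh1 : PySem.List.pyGetD (L[f] :: L.drop (f+1)) 0 0 = from_item := by
        rw [PySem.List.pyGetD_zero_cons]; exact hfval
      rw [List.find?_cons_of_neg (by rw [hh0]; simp [Ne.symm hne]),
          List.find?_cons_of_pos (by rw [hh1]; exact beq_self_eq_true _)]
      simp only [Option.getD_some]
      rw [hsl1, show ((((0:Nat):Int)) + 1) = ((1 : Nat) : Int) from by norm_num,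
          show (some (0:Int)) = (some ((0:Nat):Int)) from by norm_num,
          PySem.List.slice_natCast]
      simp only [List.drop_zero, Nat.sub_zero]
      rw [htake1, hdropLastf, hdfull]
      exact (List.drop_eq_getElem_cons hflt).symm
    · -- 0 < t < f
      have ht0' : 0 < t := Nat.pos_of_ne_zero ht0
      rw [if_pos (show (0:Int) ∉ ([(t:Int),(f:Int)] : List Int) from by
        simp only [List.mem_cons, List.not_mem_nil, or_false]; push_cast; omega)]
      have e1t : L.take t ++ [L[t]] = L.take (t+1) := by
        rw [List.take_succ, List.getElem?_eq_getElem htlt]; rfl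
      have e2t : (L.drop (t+1)).take (f-t-1) ++ [L[f]] = (L.drop (t+1)).take (f-t) := by
        rw [show f-t = (f-t-1)+1 from by omega, List.take_succ, List.getElem?_drop,
            show t+1+(f-t-1) = f from by omega, List.getElem?_eq_getElem hflt]
        rfl
      have hdec : L = L.take t ++ [L[t]] ++ ((L.drop (t+1)).take (f-t-1) ++ [L[f]]) ++ ((L.drop (f+1)).dropLast ++ [L.getLast hL]) := by
        rw [e1t, e2t, e2]
        conv_lhs => rw [← List.take_append_drop (t+1) L]
        conv_lhs => rw [← List.take_append_drop (f-t) (L.drop (t+1))]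
        rw [List.drop_drop, show t+1+(f-t) = f+1 from by omega]
        rw [List.append_assoc]
      have hfold : (List.foldl (pvSplitStep [(t:Int), (f:Int)] (L.length:Int)) ([], []) (PySem.List.enumerate L 0)).1
          = [L.take t ++ [L[t]], L[t] :: ((L.drop (t+1)).take (f-t-1) ++ [L[f]]), L[f] :: ((L.drop (f+1)).dropLast ++ [L.getLast hL])] := by
        conv_lhs => rw [hdec]
        rw [show ((L.take t ++ [L[t]] ++ ((L.drop (t+1)).take (f-t-1) ++ [L[f]]) ++ ((L.drop (f+1)).dropLast ++ [L.getLast hL])).length : Int) = (L.length : Int) from by rw [← hdec]]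
        rw [← fold_three_seg [(t:Int), (f:Int)] (L.length:Int) (L.take t) ((L.drop (t+1)).take (f-t-1)) ((L.drop (f+1)).dropLast) L[t] L[f] (L.getLast hL)
            (by intro m hm; simp only [List.length_take, List.mem_cons, List.not_mem_nil, or_false] at hm ⊢; push_cast; omega)
            (by simp only [List.length_take, List.mem_cons, List.not_mem_nil, or_false]; push_cast; omega)
            (by intro m hm; simp only [List.length_take, List.length_drop, List.mem_cons, List.not_mem_nil, or_false] at hm ⊢; push_cast; omega)
            (by simp only [List.length_take, List.length_drop, List.mem_cons, List.not_mem_nil, or_false]; push_cast; omega)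
            (by intro m hm; simp only [List.length_take, List.length_dropLast, List.length_drop, List.mem_cons, List.not_mem_nil, or_false] at hm ⊢; push_cast; omega)
            (by simp only [List.length_take, List.length_dropLast, List.length_drop, List.mem_cons, List.not_mem_nil, or_false]; push_cast; omega)]
      rw [hfold, e2t, e2]
      have hh2 : PySem.List.pyGetD (L[t] :: (L.drop (t+1)).take (f-t)) 0 0 = to_item := by
        rw [PySem.List.pyGetD_zero_cons]; exact htval
      have hh3 : PySem.List.pyGetD (L[f] :: (L.drop (f+1) ++ (L.take t ++ [L[t]]).drop 1)) 0 0 = from_item := by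
        rw [PySem.List.pyGetD_zero_cons]; exact hfval
      change ((List.find? (fun s => PySem.List.pyGetD s 0 0 == from_item)
        [L[t] :: (L.drop (t+1)).take (f-t),
         (L[f] :: L.drop (f+1)) ++ (L.take t ++ [L[t]]).drop 1]).getD []) = _
      rw [List.cons_append]
      rw [List.find?_cons_of_neg (by rw [hh2]; simp [Ne.symm hne]),
          List.find?_cons_of_pos (by rw [hh3]; exact beq_self_eq_true _)]
      simp only [Option.getD_some]
      rw [hsl1, hdropLastf,
          show ((t:Int) + 1) = ((t+1 : Nat) : Int) from by push_cast; ring,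
          show (some (0:Int)) = (some ((0:Nat):Int)) from by norm_num,
          PySem.List.slice_natCast]
      simp only [List.drop_zero, Nat.sub_zero]
      rw [e1t]
      generalize hX : (L.take (t+1)).drop 1 = X
      have htail : L.take (t+1) = L[0] :: X := by
        rw [← hX]
        conv_lhs => rw [show L.take (t+1) = (L.take (t+1)).drop 0 from (List.drop_zero).symm, List.drop_eq_getElem_cons (by rw [List.length_take]; omega)]
        simp [List.getElem_take]
      rw [htail, List.append_cons, hdfull, List.drop_eq_getElem_cons hflt, List.cons_append]

theorem final_spec (thelist : List Int) (from_item to_item : Int)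
    (hpre : from_item = to_item ∨ (thelist ≠ [] ∧ from_item ∈ thelist ∧ to_item ∈ thelist)) :
    sublist_from_to_items_in_closed_list thelist from_item to_item
      = sublist_from_to_items_in_closed_list_alt thelist from_item to_item := by
  by_cases heq : from_item = to_item
  · simp [sublist_from_to_items_in_closed_list, sublist_from_to_items_in_closed_list_alt, heq]
  · rcases hpre with heq' | ⟨hnil, hmf, hmt⟩
    · exact absurd heq' heq
    obtain ⟨z, zs, rfl⟩ := List.exists_cons_of_ne_nil hnil
    simp only [sublist_from_to_items_in_closed_list, sublist_from_to_items_in_closed_list_alt, if_neg heq]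
    set L := (if PySem.List.pyGetD (z :: zs) 0 0 ≠ PySem.List.pyGetD (z :: zs) (-1) 0
      then (z :: zs) ++ [PySem.List.pyGetD (z :: zs) 0 0] else (z :: zs)) with hLdef
    have hL : L ≠ [] := by rw [hLdef]; split_ifs <;> simp
    have hcl : L.head? = L.getLast? := by
      rw [hLdef, PySem.List.pyGetD_zero_cons]
      split_ifs with h
    -- open list: close it with z
      · rw [List.getLast?_concat]
        simp
      · rw [PySem.List.pyGetD_neg_one (h := List.cons_ne_nil z zs) (d := (0:Int))] at h
        push_neg at h
        rw [List.getLast?_eq_some_getLast (List.cons_ne_nil z zs), ← h]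
        simp
    have hmfL : from_item ∈ L := by
      rw [hLdef]; split_ifs
      · exact List.mem_append_left _ hmf
      · exact hmf
    have hmtL : to_item ∈ L := by
      rw [hLdef]; split_ifs
      · exact List.mem_append_left _ hmt
      · exact hmt
    obtain ⟨f, hf⟩ : ∃ f, PySem.List.index? L from_item = some f := by
      cases hidx : PySem.List.index? L from_item with
      | none => exact absurd hmfL ((PySem.List.index?_eq_none_iff _ _).mp hidx)
      | some f => exact ⟨f, rfl⟩
    obtain ⟨t, ht⟩ : ∃ t, PySem.List.index? L to_item = some t := by
      cases hidx : PySem.List.index? L to_item with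
      | none => exact absurd hmtL ((PySem.List.index?_eq_none_iff _ _).mp hidx)
      | some t => exact ⟨t, rfl⟩
    rw [hf, ht]
    simp only [Option.getD_some]
    exact main_core L from_item to_item heq hL hcl f t hf ht

-- ===== VERDICT (by name: the statement is the Claim_ definition above) =====
theorem sublist_from_to_items_in_closed_list_spec : Claim_equal_sublist_from_to_items_in_closed_list := by
  intro thelist from_item to_item _hdom hpre
  unfold Spec_sublist_from_to_items_in_closed_list
  exact final_spec thelist from_item to_item hpre
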